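-- pv_equiv track=rewrite | github.com/ytbprem03order/GroundBot | admin/iae/showuser.py | extract_user_details
-- ===== SOURCE A (Python) =====
-- def extract_user_details(user_list):
--     return [
--         {
--             "User ID": user.get("id", "Unknown"),
--             "Username": user.get("username", "Unknown"),
--             "Status": user.get("status", "Unknown"),
--             "Plan": user.get("plan", "Unknown"),
--             "Expiry": user.get("expiry", "Unknown"),
--             "Credit": user.get("credit", "Unknown"),
--             "Antispam Time": user.get("antispam_time", "Unknown"),
--             "Total Keys": user.get("totalkey", "Unknown"),
--             "Registration Date": user.get("reg_at", "Unknown")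
--         }
--         for user in user_list
--     ]
-- ===== SOURCE B (Python) =====
-- LABEL_OF = {
--     "id": "User ID",
--     "username": "Username",
--     "status": "Status",
--     "plan": "Plan",
--     "expiry": "Expiry",
--     "credit": "Credit",
--     "antispam_time": "Antispam Time",
--     "totalkey": "Total Keys",
--     "reg_at": "Registration Date",
-- }
--
-- def extract_user_details(user_list):
--     out = []
--     for user in user_list:
--         row = dict.fromkeys(LABEL_OF.values(), "Unknown")
--         for k, v in user.items():
--             label = LABEL_OF.get(k)
--             if label is not None:
--                 row[label] = v
--         out.append(row)
--     return out
-- ===== Notes on version B (the rewrite author's own statement) =====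
-- stated objective: alternative
-- what changed: Instead of nine per-field lookups into the user dict, B pre-fills each row with 'Unknown' defaults and makes a single scatter pass over the user's own items, routing each value through an inverse key->label index.
import Mathlib
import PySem

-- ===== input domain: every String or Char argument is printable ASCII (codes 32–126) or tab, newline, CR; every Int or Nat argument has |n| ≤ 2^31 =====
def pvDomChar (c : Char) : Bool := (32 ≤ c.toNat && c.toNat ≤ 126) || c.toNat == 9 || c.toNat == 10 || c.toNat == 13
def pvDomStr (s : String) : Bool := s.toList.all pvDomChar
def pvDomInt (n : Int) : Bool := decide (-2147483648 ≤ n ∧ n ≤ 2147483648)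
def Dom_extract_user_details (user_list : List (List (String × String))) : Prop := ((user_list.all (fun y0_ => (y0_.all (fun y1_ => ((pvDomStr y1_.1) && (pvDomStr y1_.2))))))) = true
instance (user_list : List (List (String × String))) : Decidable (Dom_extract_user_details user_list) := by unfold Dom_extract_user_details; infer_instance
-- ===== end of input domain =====

-- B pre-fills each row with 'Unknown' and scatters the user's own items through an inverse key->label index, instead of A's nine per-field lookups; alternative decomposition, same cost.

-- ===== PORT A =====
def extract_user_details (user_list : List (List (String × String))) : List (List (String × String)) :=
  user_list.map (fun user =>
    [("User ID", (PySem.Dict.mk user).getD "id" "Unknown"),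
     ("Username", (PySem.Dict.mk user).getD "username" "Unknown"),
     ("Status", (PySem.Dict.mk user).getD "status" "Unknown"),
     ("Plan", (PySem.Dict.mk user).getD "plan" "Unknown"),
     ("Expiry", (PySem.Dict.mk user).getD "expiry" "Unknown"),
     ("Credit", (PySem.Dict.mk user).getD "credit" "Unknown"),
     ("Antispam Time", (PySem.Dict.mk user).getD "antispam_time" "Unknown"),
     ("Total Keys", (PySem.Dict.mk user).getD "totalkey" "Unknown"),
     ("Registration Date", (PySem.Dict.mk user).getD "reg_at" "Unknown")])

-- ===== PORT B =====
-- LABEL_OF: inverse index source_key -> display label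
def pvLabelOf : PySem.Dict String String :=
  PySem.Dict.mk
    [("id", "User ID"), ("username", "Username"), ("status", "Status"), ("plan", "Plan"),
     ("expiry", "Expiry"), ("credit", "Credit"), ("antispam_time", "Antispam Time"),
     ("totalkey", "Total Keys"), ("reg_at", "Registration Date")]

-- row = dict.fromkeys(LABEL_OF.values(), "Unknown")
def pvRow0 : PySem.Dict String String :=
  pvLabelOf.values.foldl (fun d l => d.insert l "Unknown") PySem.Dict.empty

-- the body of B's inner loop: label = LABEL_OF.get(k); if label is not None: row[label] = v
def pvScatter (row : PySem.Dict String String) (kv : String × String) : PySem.Dict String String :=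
  match pvLabelOf.get? kv.1 with
  | some label => row.insert label kv.2
  | none => row

def extract_user_details_alt (user_list : List (List (String × String))) : List (List (String × String)) :=
  user_list.map (fun user => (user.foldl pvScatter pvRow0).items)

-- ===== PRECONDITION & SPEC =====
-- Pre_ excludes association lists in which some user has a duplicate key: a Python dict cannot
-- have duplicate keys, so such lists do not represent any input of the Python programs.
def Pre_extract_user_details (user_list : List (List (String × String))) : Prop :=
  ∀ u ∈ user_list, (u.map Prod.fst).Nodup
instance (user_list : List (List (String × String))) : Decidable (Pre_extract_user_details user_list) := by unfold Pre_extract_user_details; infer_instance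

def pvWitness_extract_user_details : (List (List (String × String))) :=
  [[("id", "7"), ("plan", "pro")], []]

def Spec_extract_user_details (user_list : List (List (String × String))) (out : List (List (String × String))) : Prop := out = extract_user_details_alt user_list
instance (user_list : List (List (String × String))) (out : List (List (String × String))) : Decidable (Spec_extract_user_details user_list out) := by unfold Spec_extract_user_details; infer_instance

-- ===== CLAIM (what is proved, stated in full; the proofs are below) =====
def Claim_equal_extract_user_details : Prop := ∀ (user_list : List (List (String × String))), Dom_extract_user_details user_list → Pre_extract_user_details user_list → Spec_extract_user_details user_list (extract_user_details user_list)

-- ===== LEMMAS AND PROOFS =====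

-- any label produced by the inverse index is one of the nine row keys
theorem pvLabelOf_mem_values (k label : String) (h : pvLabelOf.get? k = some label) :
    label ∈ pvRow0.keys := by
  simp only [pvLabelOf, PySem.Dict.get?_mk_cons] at h
  split_ifs at h <;> cases h <;> decide

-- the scatter loop never changes the row's key list
theorem keys_foldl_pvScatter (u : List (String × String)) (d : PySem.Dict String String)
    (hk : d.keys = pvRow0.keys) : (u.foldl pvScatter d).keys = pvRow0.keys := by
  induction u generalizing d with
  | nil => exact hk
  | cons kv rest ih =>
    simp only [List.foldl_cons]
    apply ih
    unfold pvScatter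
    cases hg : pvLabelOf.get? kv.1 with
    | none => exact hk
    | some label =>
      rw [PySem.Dict.keys_insert_of_contains]
      · exact hk
      · rw [PySem.Dict.contains_eq_decide_mem_keys, hk]
        simpa using pvLabelOf_mem_values _ _ hg

-- if no key of u maps to this label, the scatter loop leaves its value alone
theorem foldl_pvScatter_getD_of_absent (u : List (String × String))
    (d : PySem.Dict String String) (label : String)
    (h : ∀ kv ∈ u, pvLabelOf.get? kv.1 ≠ some label) :
    (u.foldl pvScatter d).getD label "Unknown" = d.getD label "Unknown" := by
  induction u generalizing d with
  | nil => rfl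
  | cons kv rest ih =>
    simp only [List.foldl_cons]
    rw [ih _ (fun kv' h' => h kv' (List.mem_cons_of_mem _ h'))]
    unfold pvScatter
    cases hg : pvLabelOf.get? kv.1 with
    | none => rfl
    | some label' =>
      rw [PySem.Dict.getD_insert_of_ne]
      intro he; exact h kv (List.mem_cons_self) (he ▸ hg)

-- the scattered value at 'label' is the user's first-match value at 'key'
theorem foldl_pvScatter_getD (u : List (String × String)) (d : PySem.Dict String String)
    (label key : String)
    (hlk : pvLabelOf.get? key = some label)
    (hinj : ∀ k', pvLabelOf.get? k' = some label → k' = key)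
    (hnd : (u.map Prod.fst).Nodup)
    (hd : d.getD label "Unknown" = "Unknown") :
    (u.foldl pvScatter d).getD label "Unknown" = (PySem.Dict.mk u).getD key "Unknown" := by
  induction u generalizing d with
  | nil => simpa using hd
  | cons kv rest ih =>
    simp only [List.map_cons, List.nodup_cons] at hnd
    have hget : (PySem.Dict.mk (kv :: rest)).getD key "Unknown"
        = if kv.1 == key then kv.2 else (PySem.Dict.mk rest).getD key "Unknown" := by
      rw [PySem.Dict.getD_eq_get?_getD, PySem.Dict.get?_mk_cons]
      split_ifs with h <;> simp [PySem.Dict.getD_eq_get?_getD]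
    rw [hget]
    simp only [List.foldl_cons]
    by_cases hk : kv.1 = key
    · simp only [hk, beq_self_eq_true, if_true]
      rw [foldl_pvScatter_getD_of_absent]
      · unfold pvScatter
        rw [hk, hlk]
        exact PySem.Dict.getD_insert_self _ _ _ _
      · intro kv' hmem he
        have hin : kv.1 ∈ List.map Prod.fst rest := by
          rw [hk, ← hinj kv'.1 he]; exact List.mem_map_of_mem hmem
        exact hnd.1 hin
    · simp only [beq_iff_eq, hk, if_false]
      apply ih _ hnd.2
      unfold pvScatter
      cases hg : pvLabelOf.get? kv.1 with
      | none => exact hd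
      | some label' =>
        rw [PySem.Dict.getD_insert_of_ne]
        · exact hd
        · intro he; exact hk (hinj kv.1 (he ▸ hg))

-- per user: B's scattered row lists exactly A's nine formatted pairs
set_option maxHeartbeats 1000000 in
theorem row_items_eq (u : List (String × String)) (hnd : (u.map Prod.fst).Nodup) :
    (u.foldl pvScatter pvRow0).items =
    [("User ID", (PySem.Dict.mk u).getD "id" "Unknown"),
     ("Username", (PySem.Dict.mk u).getD "username" "Unknown"),
     ("Status", (PySem.Dict.mk u).getD "status" "Unknown"),
     ("Plan", (PySem.Dict.mk u).getD "plan" "Unknown"),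
     ("Expiry", (PySem.Dict.mk u).getD "expiry" "Unknown"),
     ("Credit", (PySem.Dict.mk u).getD "credit" "Unknown"),
     ("Antispam Time", (PySem.Dict.mk u).getD "antispam_time" "Unknown"),
     ("Total Keys", (PySem.Dict.mk u).getD "totalkey" "Unknown"),
     ("Registration Date", (PySem.Dict.mk u).getD "reg_at" "Unknown")] := by
  have hkeys := keys_foldl_pvScatter u pvRow0 rfl
  have hitems := PySem.Dict.items_eq_map_keys (u.foldl pvScatter pvRow0)
    (by rw [hkeys]; decide) "Unknown"
  rw [hitems, hkeys]
  show List.map _ ["User ID", "Username", "Status", "Plan", "Expiry", "Credit",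
    "Antispam Time", "Total Keys", "Registration Date"] = _
  simp only [List.map_cons, List.map_nil, List.cons.injEq, Prod.mk.injEq, true_and, and_true]
  refine ⟨?_, ?_, ?_, ?_, ?_, ?_, ?_, ?_, ?_⟩ <;>
    exact foldl_pvScatter_getD u pvRow0 _ _ (by decide)
      (by intro k' h; simp only [pvLabelOf, PySem.Dict.get?_mk_cons] at h;
          split_ifs at h <;>
            simp_all [show ({items := []} : PySem.Dict String String) = PySem.Dict.empty from rfl])
      hnd (by decide)

-- ===== VERDICT (by name: the statement is the Claim_ definition above) =====
theorem extract_user_details_spec : Claim_equal_extract_user_details := by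
  intro ul _ hpre
  show _ = _
  unfold extract_user_details extract_user_details_alt
  exact List.map_congr_left fun u hu => (row_items_eq u (hpre u hu)).symm
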